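-- pv_equiv track=rewrite | github.com/ShkodranBiqkaj/Python-Stealth-Game | Classes/Game.py | optimize_patrol_route
-- ===== SOURCE A (Python) =====
-- def optimize_patrol_route(route):
--     if not route:
--         return route
--     out = []
--     for c in route:
--         if not out or out[-1] != c:
--             out.append(c)
--     i = 0
--     while i < len(out) - 2:
--         if out[i] == out[i+2]:
--             del out[i+1]
--         else:
--             i += 1
--     return out
-- ===== SOURCE B (Python) =====
-- def optimize_patrol_route(route):
--     out = []
--     for c in route:
--         if out and out[-1] == c:
--             continue
--         if len(out) >= 2 and out[-2] == c:
--             out.pop()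
--         out.append(c)
--     return out
-- ===== Notes on version B (the rewrite author's own statement) =====
-- stated objective: faster
-- what changed: Replaced A's two-phase algorithm (adjacent-dedup pass followed by a while loop that repeatedly deletes the middle element with del, shifting the list) by a single left-to-right pass maintaining a stack: skip an element equal to the top, pop the top when the element equals the second-from-top, then push.
import Mathlib
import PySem

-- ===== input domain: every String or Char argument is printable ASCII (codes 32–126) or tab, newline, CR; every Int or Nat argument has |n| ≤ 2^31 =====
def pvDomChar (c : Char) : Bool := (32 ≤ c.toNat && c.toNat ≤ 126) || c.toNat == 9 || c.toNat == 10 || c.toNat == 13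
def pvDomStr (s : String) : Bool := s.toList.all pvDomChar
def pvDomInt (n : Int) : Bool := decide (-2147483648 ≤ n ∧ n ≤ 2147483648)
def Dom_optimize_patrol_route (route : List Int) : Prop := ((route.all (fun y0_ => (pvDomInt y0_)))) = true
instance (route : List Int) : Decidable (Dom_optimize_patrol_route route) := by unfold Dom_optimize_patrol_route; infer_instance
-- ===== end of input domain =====

-- B replaces A's adjacent-dedup pass plus while/del collapse loop by a single stack pass (same return value).

-- ===== PORT A =====
-- the for-loop body: append c unless out is nonempty with out[-1] == c
def pvDedupStep (out : List Int) (c : Int) : List Int :=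
  if out = [] ∨ PySem.List.pyGetD out (-1) 0 ≠ c then out ++ [c] else out

-- the while loop: while i < len(out) - 2: if out[i] == out[i+2]: del out[i+1] else i += 1
def pvDelWhile (out : List Int) (i : Nat) : List Int :=
  if i + 2 < out.length then
    if PySem.List.pyGetD out (i : Int) 0 = PySem.List.pyGetD out ((i : Int) + 2) 0 then
      pvDelWhile (out.take (i+1) ++ out.drop (i+2)) i
    else pvDelWhile out (i+1)
  else out
termination_by out.length - i
decreasing_by
  · simp [List.length_take, List.length_drop]; omega
  · omega

def optimize_patrol_route (route : List Int) : List Int :=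
  if route = [] then route
  else pvDelWhile (route.foldl pvDedupStep []) 0

-- ===== PORT B =====
-- the loop body: skip if out[-1] == c; pop if out[-2] == c; then append c
def pvStep (out : List Int) (c : Int) : List Int :=
  if out ≠ [] ∧ PySem.List.pyGetD out (-1) 0 = c then out
  else
    let out1 := if 2 ≤ out.length ∧ PySem.List.pyGetD out (-2) 0 = c then out.dropLast else out
    out1 ++ [c]

def optimize_patrol_route_alt (route : List Int) : List Int :=
  route.foldl pvStep []

-- ===== PRECONDITION & SPEC =====
def Spec_optimize_patrol_route (route : List Int) (out : List Int) : Prop := out = optimize_patrol_route_alt route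
instance (route : List Int) (out : List Int) : Decidable (Spec_optimize_patrol_route route out) := by unfold Spec_optimize_patrol_route; infer_instance

-- ===== CLAIM (what is proved, stated in full; the proofs are below) =====
def Claim_equal_optimize_patrol_route : Prop := ∀ (route : List Int), Dom_optimize_patrol_route route → Spec_optimize_patrol_route route (optimize_patrol_route route)

-- ===== LEMMAS AND PROOFS =====

-- B's stack step in head-first (reversed) representation
def rstep (S : List Int) (c : Int) : List Int :=
  match S with
  | [] => [c]
  | a :: t =>
    if a = c then a :: t
    else
      match t with
      | [] => c :: a :: t
      | b :: t' => if b = c then c :: b :: t' else c :: a :: t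

-- adjacent dedup, structural form (last = last kept element)
def adj (last : Option Int) : List Int → List Int
  | [] => []
  | c :: t => if last = some c then adj last t else c :: adj (some c) t

-- A's while loop, re-expressed on (reversed settled prefix, remaining window)
def gAux (acc : List Int) (rest : List Int) : List Int :=
  match rest with
  | x :: y :: z :: t =>
    if x = z then gAux acc (x :: z :: t) else gAux (x :: acc) (y :: z :: t)
  | _ => acc.reverse ++ rest
termination_by rest.length
decreasing_by all_goals (simp only [List.length_cons]; omega)

theorem gAux_cons3 (acc : List Int) (x y z : Int) (t : List Int) :
    gAux acc (x :: y :: z :: t) =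
      if x = z then gAux acc (x :: z :: t) else gAux (x :: acc) (y :: z :: t) := by
  simp only [gAux]

theorem gAux_short (acc : List Int) (rest : List Int) (h : rest.length ≤ 2) :
    gAux acc rest = acc.reverse ++ rest := by
  match rest with
  | [] => simp only [gAux]
  | [x] => simp only [gAux]
  | [x, y] => simp only [gAux]
  | x :: y :: z :: t => simp at h

theorem dedup_eq (l : List Int) : ∀ out : List Int,
    List.foldl pvDedupStep out l = out ++ adj out.getLast? l := by
  induction l with
  | nil => intro out; simp [adj]
  | cons c t ih =>
    intro out
    by_cases h : out.getLast? = some c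
    · have hne : out ≠ [] := by intro he; simp [he] at h
      have hlast : PySem.List.pyGetD out (-1) 0 = c := by
        rw [PySem.List.pyGetD_neg_one out 0 hne]
        have := List.getLast?_eq_getLast hne
        rw [this] at h
        exact Option.some.inj h
      have hcond : ¬ (out = [] ∨ PySem.List.pyGetD out (-1) 0 ≠ c) := by
        simp [hne, hlast]
      rw [List.foldl_cons, show pvDedupStep out c = out from by rw [pvDedupStep, if_neg hcond]]
      rw [ih out]
      simp [adj, h]
    · have hcond : out = [] ∨ PySem.List.pyGetD out (-1) 0 ≠ c := by
        by_cases he : out = []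
        · exact Or.inl he
        · refine Or.inr fun hc => h ?_
          rw [PySem.List.pyGetD_neg_one out 0 he] at hc
          rw [List.getLast?_eq_getLast he, hc]
      rw [List.foldl_cons,
        show pvDedupStep out c = out ++ [c] from by rw [pvDedupStep, if_pos hcond]]
      rw [ih (out ++ [c])]
      simp [adj, h]

theorem chain_adj (l : List Int) : ∀ x : Int, List.IsChain (· ≠ ·) (x :: adj (some x) l) := by
  induction l with
  | nil => intro x; simp [adj]
  | cons c t ih =>
    intro x
    by_cases h : x = c
    · rw [adj, if_pos (by rw [h])]
      exact ih x
    · rw [adj, if_neg (by simpa using h)]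
      exact List.isChain_cons_cons.mpr ⟨h, ih c⟩

theorem rstep_skip (S : List Int) (c : Int) (h : S.head? = some c) : rstep S c = S := by
  match S with
  | [] => simp at h
  | a :: t =>
    have ha : a = c := by simpa using h
    simp [rstep, ha]

theorem rstep_head (S : List Int) (c : Int) (h : S.head? ≠ some c) :
    (rstep S c).head? = some c := by
  match S with
  | [] => simp [rstep]
  | a :: t =>
    have ha : ¬ a = c := by simpa using h
    match t with
    | [] => simp [rstep, ha]
    | b :: t' => by_cases hb : b = c <;> simp [rstep, ha, hb]

theorem skip_adj (l : List Int) : ∀ S : List Int,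
    List.foldl rstep S l = List.foldl rstep S (adj S.head? l) := by
  induction l with
  | nil => intro S; simp [adj]
  | cons c t ih =>
    intro S
    by_cases h : S.head? = some c
    · rw [adj, if_pos h, List.foldl_cons, rstep_skip S c h]
      exact ih S
    · rw [adj, if_neg h, List.foldl_cons, List.foldl_cons]
      have := ih (rstep S c)
      rw [rstep_head S c h] at this
      exact this

theorem pyGetD_snoc2_neg2 (xs : List Int) (b a : Int) :
    PySem.List.pyGetD (xs ++ [b, a]) (-2) 0 = b := by
  have he : xs ++ [b, a] = (xs ++ [b]) ++ [a] := by simp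
  rw [he, PySem.List.pyGetD_neg_ofNat ((xs ++ [b]) ++ [a]) 2 0 (by omega) (by simp)]
  simp

theorem step_rev (R : List Int) (c : Int) : pvStep R.reverse c = (rstep R c).reverse := by
  match R with
  | [] => simp [pvStep, rstep]
  | [a] =>
    have h1 : ∀ x : Int, PySem.List.pyGetD ([x] : List Int) (-1) 0 = x := fun x => by
      simpa using PySem.List.pyGetD_neg_one_append_singleton ([] : List Int) x 0
    by_cases h : a = c <;> simp [pvStep, rstep, h1, h]
  | a :: b :: t =>
    have h1 : ∀ x : Int, PySem.List.pyGetD (t.reverse ++ [b, x]) (-1) 0 = x := fun x => by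
      rw [show t.reverse ++ [b, x] = (t.reverse ++ [b]) ++ [x] by simp]
      exact PySem.List.pyGetD_neg_one_append_singleton _ _ _
    have h2 : ∀ x : Int, PySem.List.pyGetD (t.reverse ++ [b, x]) (-2) 0 = b := fun x =>
      pyGetD_snoc2_neg2 t.reverse b x
    have hdl : ∀ x : Int, (t.reverse ++ [b, x]).dropLast = t.reverse ++ [b] := fun x => by
      rw [show t.reverse ++ [b, x] = (t.reverse ++ [b]) ++ [x] by simp, List.dropLast_concat]
    by_cases h : a = c
    · simp [pvStep, rstep, h1, h]
    · by_cases hb : b = c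
      · subst hb; simp [pvStep, rstep, h1, h2, hdl, h]
      · simp [pvStep, rstep, h1, h2, h, hb]

theorem fold_rev (l : List Int) : ∀ R : List Int,
    List.foldl pvStep R.reverse l = (List.foldl rstep R l).reverse := by
  induction l with
  | nil => intro R; rfl
  | cons c t ih =>
    intro R
    rw [List.foldl_cons, List.foldl_cons, step_rev R c]
    exact ih (rstep R c)

theorem core (rs : List Int) : ∀ (x y : Int) (acc : List Int),
    List.IsChain (· ≠ ·) (y :: rs) →
    gAux acc (x :: y :: rs) = (List.foldl rstep (y :: x :: acc) rs).reverse := by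
  induction rs with
  | nil =>
    intro x y acc _
    rw [gAux_short acc [x, y] (by simp)]
    simp
  | cons z t ih =>
    intro x y acc hch
    have hyz : y ≠ z := (List.isChain_cons_cons.mp hch).1
    have hzt : List.IsChain (· ≠ ·) (z :: t) := (List.isChain_cons_cons.mp hch).2
    by_cases hxz : x = z
    · rw [gAux_cons3, if_pos hxz, ih x z acc hzt]
      simp only [List.foldl_cons, rstep, if_neg hyz, if_pos hxz]
    · rw [gAux_cons3, if_neg hxz, ih y z (x :: acc) hzt]
      simp only [List.foldl_cons, rstep, if_neg hyz, if_neg hxz]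

theorem while_bridge (out : List Int) (i : Nat) :
    pvDelWhile out i = gAux ((out.take i).reverse) (out.drop i) := by
  induction out, i using pvDelWhile.induct with
  | case1 out i hlt heq ih =>
    have hi : i < out.length := by omega
    have hi1 : i + 1 < out.length := by omega
    have hi2 : i + 2 < out.length := by omega
    have hg1 : PySem.List.pyGetD out (i : Int) 0 = out[i] := by
      rw [PySem.List.pyGetD_natCast]; exact List.getD_eq_getElem _ _ hi
    have hg2 : PySem.List.pyGetD out ((i : Int) + 2) 0 = out[i+2] := by
      rw [show ((i : Int) + 2) = ((i + 2 : Nat) : Int) by push_cast; ring,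
        PySem.List.pyGetD_natCast]
      exact List.getD_eq_getElem _ _ hi2
    have heqv : out[i] = out[i+2] := by rw [← hg1, ← hg2]; exact heq
    have htake : (out.take (i+1) ++ out.drop (i+2)).take i = out.take i := by
      rw [List.take_append_of_le_length (by simp; omega), List.take_take]
      congr 1; omega
    have hdrop' : (out.take (i+1) ++ out.drop (i+2)).drop i
        = out[i] :: out.drop (i+2) := by
      rw [List.drop_append_of_le_length (by simp; omega), List.drop_take]
      rw [List.drop_eq_getElem_cons hi, Nat.add_sub_cancel_left, List.take_succ_cons,
        List.take_zero]
      rfl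
    rw [pvDelWhile, if_pos hlt, if_pos heq, ih, htake, hdrop',
      List.drop_eq_getElem_cons hi, List.drop_eq_getElem_cons hi1,
      List.drop_eq_getElem_cons hi2, gAux_cons3, if_pos heqv,
      ← List.drop_eq_getElem_cons hi2]
  | case2 out i hlt hne ih =>
    have hi : i < out.length := by omega
    have hi1 : i + 1 < out.length := by omega
    have hi2 : i + 2 < out.length := by omega
    have hg1 : PySem.List.pyGetD out (i : Int) 0 = out[i] := by
      rw [PySem.List.pyGetD_natCast]; exact List.getD_eq_getElem _ _ hi
    have hg2 : PySem.List.pyGetD out ((i : Int) + 2) 0 = out[i+2] := by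
      rw [show ((i : Int) + 2) = ((i + 2 : Nat) : Int) by push_cast; ring,
        PySem.List.pyGetD_natCast]
      exact List.getD_eq_getElem _ _ hi2
    have hnev : out[i] ≠ out[i+2] := by rw [← hg1, ← hg2]; exact hne
    have htake1 : out.take (i+1) = out.take i ++ [out[i]] := by
      rw [List.take_add_one]
      simp [List.getElem?_eq_getElem hi]
    rw [pvDelWhile, if_pos hlt, if_neg hne, ih,
      List.drop_eq_getElem_cons hi, List.drop_eq_getElem_cons hi1,
      List.drop_eq_getElem_cons hi2, gAux_cons3, if_neg hnev,
      ← List.drop_eq_getElem_cons hi2, ← List.drop_eq_getElem_cons hi1]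
    congr 1
    rw [htake1]
    simp
  | case3 out i hge =>
    rw [pvDelWhile, if_neg hge,
      gAux_short _ _ (by simp only [List.length_drop]; omega),
      List.reverse_reverse, List.take_append_drop]

-- ===== VERDICT (by name: the statement is the Claim_ definition above) =====
theorem optimize_patrol_route_spec : Claim_equal_optimize_patrol_route := by
  intro route _
  unfold Spec_optimize_patrol_route optimize_patrol_route optimize_patrol_route_alt
  by_cases hr : route = []
  · simp [hr]
  · rw [if_neg hr]
    have hd : route.foldl pvDedupStep [] = adj none route := by
      rw [dedup_eq route []]; simp
    have hB : route.foldl pvStep [] = (List.foldl rstep [] (adj none route)).reverse := by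
      have h1 : route.foldl pvStep [] = (List.foldl rstep [] route).reverse := by
        simpa using fold_rev route []
      rw [h1]
      congr 1
      simpa using skip_adj route []
    rw [hd, hB, while_bridge]
    simp only [List.take_zero, List.reverse_nil, List.drop_zero]
    obtain ⟨c, t, rfl⟩ : ∃ c t, route = c :: t := by
      cases route with
      | nil => exact absurd rfl hr
      | cons c t => exact ⟨c, t, rfl⟩
    rw [show adj (none : Option Int) (c :: t) = c :: adj (some c) t from by
      rw [adj, if_neg (by simp)]]
    have hch : List.IsChain (· ≠ ·) (c :: adj (some c) t) := chain_adj t c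
    match hm : adj (some c) t with
    | [] =>
      rw [gAux_short _ _ (by simp)]
      simp [rstep]
    | y :: rs =>
      rw [hm] at hch
      have hcy : c ≠ y := (List.isChain_cons_cons.mp hch).1
      have hch' : List.IsChain (· ≠ ·) (y :: rs) := (List.isChain_cons_cons.mp hch).2
      rw [core rs c y [] hch']
      simp only [List.foldl_cons, rstep, if_neg hcy]
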